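-- pv_equiv track=rewrite | github.com/s8sarame/PPP | SPfunctions.py | calculatecharge
-- ===== SOURCE A (Python) =====
-- def calculatecharge(li): #to calculate charge on peptide sequence
--
--     charge = 0
--     for aa in li:
--         if aa in ('R', 'K', 'H'): #checks if sequence contains Arginine, Histine or Lysine
--             charge += 1           #increment the charge
--         elif aa in ('D', 'E'): #checks if sequence contains Aspartic acid or Glutamic acid
--                 charge -= 1         #decrement the charge
--         else:
--             charge = charge
--     return charge
-- ===== SOURCE B (Python) =====
-- def calculatecharge(li):  # net charge via five count passes, no explicit loop
--     return (li.count('R') + li.count('K') + li.count('H')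
--             - li.count('D') - li.count('E'))
-- ===== Notes on version B (the rewrite author's own statement) =====
-- stated objective: idiomatic
-- what changed: Replaces the single accumulator loop with five independent .count passes combined arithmetically.
import Mathlib
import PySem

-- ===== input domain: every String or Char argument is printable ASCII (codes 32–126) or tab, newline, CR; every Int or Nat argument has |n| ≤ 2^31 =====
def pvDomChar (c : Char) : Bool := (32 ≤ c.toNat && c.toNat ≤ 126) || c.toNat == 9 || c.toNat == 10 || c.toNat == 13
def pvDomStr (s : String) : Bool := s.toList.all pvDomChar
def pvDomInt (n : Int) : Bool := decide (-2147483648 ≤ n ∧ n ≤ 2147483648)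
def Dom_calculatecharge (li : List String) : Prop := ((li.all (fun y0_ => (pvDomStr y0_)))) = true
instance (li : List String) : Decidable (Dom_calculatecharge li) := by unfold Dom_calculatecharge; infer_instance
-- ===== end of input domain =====

-- ===== PORT A =====
-- B replaces the accumulator loop with five count passes; proved equal on Dom.
def calculatecharge (li : List String) : Int :=
  li.foldl (fun charge aa =>
    if aa = "R" ∨ aa = "K" ∨ aa = "H" then charge + 1
    else if aa = "D" ∨ aa = "E" then charge - 1
    else charge) 0

-- ===== PORT B =====
def calculatecharge_alt (li : List String) : Int :=
  (PySem.List.count li "R" : Int) + (PySem.List.count li "K" : Int) + (PySem.List.count li "H" : Int)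
    - (PySem.List.count li "D" : Int) - (PySem.List.count li "E" : Int)

-- ===== PRECONDITION & SPEC =====
def Spec_calculatecharge (li : List String) (out : Int) : Prop := out = calculatecharge_alt li
instance (li : List String) (out : Int) : Decidable (Spec_calculatecharge li out) := by unfold Spec_calculatecharge; infer_instance

-- ===== CLAIM (what is proved, stated in full; the proofs are below) =====
def Claim_equal_calculatecharge : Prop := ∀ (li : List String), Dom_calculatecharge li → Spec_calculatecharge li (calculatecharge li)

-- ===== LEMMAS AND PROOFS =====

-- ===== VERDICT (by name: the statement is the Claim_ definition above) =====
lemma calccharge_shift (li : List String) (c : Int) :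
    li.foldl (fun charge aa =>
      if aa = "R" ∨ aa = "K" ∨ aa = "H" then charge + 1
      else if aa = "D" ∨ aa = "E" then charge - 1
      else charge) c = c + calculatecharge_alt li := by
  induction li generalizing c with
  | nil => simp [calculatecharge_alt, PySem.List.count]
  | cons a t ih =>
    simp only [List.foldl_cons, ih, calculatecharge_alt, PySem.List.count, List.count_cons]
    by_cases h1 : a = "R" ∨ a = "K" ∨ a = "H"
    · rcases h1 with rfl | rfl | rfl <;> (simp; push_cast; ring)
    · by_cases h2 : a = "D" ∨ a = "E"
      · rcases h2 with rfl | rfl <;> (simp; push_cast; ring)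
      · push_neg at h1 h2
        simp [h1.1, h1.2.1, h1.2.2, h2.1, h2.2]

theorem calculatecharge_spec : Claim_equal_calculatecharge := by
  intro li _
  unfold Spec_calculatecharge calculatecharge
  rw [calccharge_shift]
  ring
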